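-- pv_equiv track=rewrite | github.com/bhavesh-20/competitive-codes | Facebook hackercup/source_codes/C1.py | dfs
-- ===== SOURCE A (Python) =====
-- def dfs(graph, visited, c,i):
--     visited[i] = True
--     arr = []
--     if i in graph:
--         for j in graph[i]:
--             if not visited[j]:
--                 x = dfs(graph, visited,c, j)
--                 arr.append(x)
--     return_value = c[i-1]
--     if len(arr)>0:
--         if i == 1:
--             arr.sort(reverse=True)
--             m = arr[0]
--             if len(arr) > 1:
--                 m += arr[1]
--         else:
--             m = max(arr)
--         return_value += m
--     return return_value
-- ===== SOURCE B (Python) =====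
-- def dfs(graph, visited, c, i):
--     # Same traversal and in-place mutation of `visited` as the original;
--     # aggregates child values with a constant-space online top-two tracker
--     # instead of building a list and sorting/scanning it.
--     visited[i] = True
--     best = None  # None, or (m1, m2) with m2 = None or m2 <= m1
--     for j in graph.get(i, ()):
--         if not visited[j]:
--             x = dfs(graph, visited, c, j)
--             if best is None:
--                 best = (x, None)
--             else:
--                 m1, m2 = best
--                 if x > m1:
--                     best = (x, m1)
--                 elif m2 is None or x > m2:
--                     best = (m1, x)
--     v = c[i - 1]
--     if best is not None:
--         m1, m2 = best
--         v += m1 + m2 if (i == 1 and m2 is not None) else m1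
--     return v
-- ===== Notes on version B (the rewrite author's own statement) =====
-- stated objective: alternative
-- what changed: B keeps the same traversal but replaces A's per-node build-a-list-then-sort (root) / max-scan aggregation of child values with a constant-space online top-two tracker updated as each child finishes, so no list is built and nothing is sorted.
import Mathlib
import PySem

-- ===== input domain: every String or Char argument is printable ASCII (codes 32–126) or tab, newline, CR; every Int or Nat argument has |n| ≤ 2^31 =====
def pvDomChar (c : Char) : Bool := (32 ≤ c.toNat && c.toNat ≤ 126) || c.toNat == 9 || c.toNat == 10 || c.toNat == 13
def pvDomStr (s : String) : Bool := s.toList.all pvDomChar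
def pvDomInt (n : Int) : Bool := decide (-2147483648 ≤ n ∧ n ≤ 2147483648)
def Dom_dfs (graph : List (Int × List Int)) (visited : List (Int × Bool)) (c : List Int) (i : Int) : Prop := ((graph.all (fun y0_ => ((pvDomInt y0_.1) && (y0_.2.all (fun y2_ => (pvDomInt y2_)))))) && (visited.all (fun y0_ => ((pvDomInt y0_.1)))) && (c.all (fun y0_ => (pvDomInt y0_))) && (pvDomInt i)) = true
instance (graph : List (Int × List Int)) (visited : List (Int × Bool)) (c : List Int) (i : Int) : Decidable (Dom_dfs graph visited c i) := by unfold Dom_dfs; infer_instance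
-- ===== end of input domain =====

-- B replaces A's per-node build-a-list-then-sort/max aggregation by a constant-space online
-- top-two tracker (same traversal; both Pythons mutate `visited` identically in place; the
-- equivalence proved here is about the return value).

-- ===== PORT A =====
-- The recursion is run on fuel `visited.length + 1`: every recursive call enters a key of
-- `visited` that is mapped to `false` and flips it to `true`, so the depth never exceeds it.
-- `return_value = c[i-1]; if len(arr)>0: ...` — the tail of A, on state (arr, visited)
def finishA (c : List Int) (i : Int) (st : List Int × PySem.Dict Int Bool) : Int × PySem.Dict Int Bool :=
  let rv := PySem.List.pyGetD c (i - 1) 0          -- `c[i-1]` (out of range raises: outside Pre_)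
  if st.1.length > 0 then
    if i = 1 then
      let s := PySem.List.sorted st.1 (fun x => x) true   -- `arr.sort(reverse=True)`
      let m := PySem.List.pyGetD s 0 0
      (rv + (if st.1.length > 1 then m + PySem.List.pyGetD s 1 0 else m), st.2)
    else
      (rv + ((PySem.List.max? st.1 (fun x => x)).getD 0), st.2)   -- `max(arr)`, arr nonempty
  else (rv, st.2)

def dfsA (graph : PySem.Dict Int (List Int)) (c : List Int) :
    Nat → PySem.Dict Int Bool → Int → Int × PySem.Dict Int Bool
  | 0, visited, _ => (0, visited)  -- unreachable with the fuel supplied at the top call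
  | fuel+1, visited, i =>
    let visited := visited.insert i true
    finishA c i
      (match graph.get? i with                     -- `if i in graph: for j in graph[i]:`
      | some ns =>
        ns.foldl (fun (st : List Int × PySem.Dict Int Bool) j =>
          if (st.2.get? j).getD true = false then  -- `if not visited[j]:` (missing key raises in Python: outside Pre_)
            let r := dfsA graph c fuel st.2 j
            (st.1 ++ [r.1], r.2)                   -- `arr.append(x)`
          else st) ([], visited)
      | none => ([], visited))

def dfs (graph : List (Int × List Int)) (visited : List (Int × Bool)) (c : List Int) (i : Int) : Int :=
  (dfsA (PySem.Dict.mk graph) c (visited.length + 1) (PySem.Dict.mk visited) i).1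

-- ===== PORT B =====
-- online top-two tracker: `push best x` is B's update of `best` by one child value
def push (best : Option (Int × Option Int)) (x : Int) : Option (Int × Option Int) :=
  match best with
  | none => some (x, none)
  | some (m1, m2) =>
    if x > m1 then some (x, some m1)
    else
      match m2 with
      | none => some (m1, some x)
      | some m2v => if x > m2v then some (m1, some x) else some (m1, some m2v)

-- the tail of B, on state (best, visited)
def finishB (c : List Int) (i : Int) (st : Option (Int × Option Int) × PySem.Dict Int Bool) :
    Int × PySem.Dict Int Bool :=
  let v := PySem.List.pyGetD c (i - 1) 0
  match st.1 with
  | none => (v, st.2)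
  | some (m1, m2) =>
    (v + (if i = 1 then (match m2 with | some m2v => m1 + m2v | none => m1) else m1), st.2)

def dfsB (graph : PySem.Dict Int (List Int)) (c : List Int) :
    Nat → PySem.Dict Int Bool → Int → Int × PySem.Dict Int Bool
  | 0, visited, _ => (0, visited)
  | fuel+1, visited, i =>
    let visited := visited.insert i true
    finishB c i
      (((graph.get? i).getD []).foldl              -- `for j in graph.get(i, ()):`
        (fun (st : Option (Int × Option Int) × PySem.Dict Int Bool) j =>
          if (st.2.get? j).getD true = false then
            let r := dfsB graph c fuel st.2 j
            (push st.1 r.1, r.2)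
          else st) (none, visited))

def dfs_alt (graph : List (Int × List Int)) (visited : List (Int × Bool)) (c : List Int) (i : Int) : Int :=
  (dfsB (PySem.Dict.mk graph) c (visited.length + 1) (PySem.Dict.mk visited) i).1

-- ===== PRECONDITION & SPEC =====
-- A raises (KeyError / IndexError) exactly when some node reachable from i through
-- initially-unvisited nodes has a neighbour that is not a key of `visited`, or indexes
-- outside c; Pre_dfs states safety of that reachable set, a closure of the input graph.
def pvInIdx (c : List Int) (k : Int) : Bool := decide (-(c.length : Int) ≤ k - 1 ∧ k - 1 < (c.length : Int))
def pvAdj (graph : List (Int × List Int)) (k : Int) : List Int := ((PySem.Dict.mk graph).get? k).getD []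
def pvFalse (visited : List (Int × Bool)) (k : Int) : Bool := (PySem.Dict.mk visited).get? k == some false
def pvStep (graph : List (Int × List Int)) (visited : List (Int × Bool)) (s : List Int) : List Int :=
  s.foldl (fun acc k => (pvAdj graph k).foldl
    (fun acc j => if pvFalse visited j then PySem.Set.add acc j else acc) acc) s
def pvEntered (graph : List (Int × List Int)) (visited : List (Int × Bool)) (i : Int) : List Int :=
  (pvStep graph visited)^[visited.length + 1] [i]

def Pre_dfs (graph : List (Int × List Int)) (visited : List (Int × Bool)) (c : List Int) (i : Int) : Prop :=
  ∀ k ∈ pvEntered graph visited i,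
    pvInIdx c k = true ∧ ∀ j ∈ pvAdj graph k, (((PySem.Dict.mk visited).get? j).isSome ∨ j = i)
instance (graph : List (Int × List Int)) (visited : List (Int × Bool)) (c : List Int) (i : Int) : Decidable (Pre_dfs graph visited c i) := by unfold Pre_dfs; infer_instance

def pvWitness_dfs : (List (Int × List Int)) × (List (Int × Bool)) × List Int × Int :=
  ([(1, [2, 3]), (2, []), (3, [])], [(2, false), (3, false)], [10, 1, 2], 1)

def Spec_dfs (graph : List (Int × List Int)) (visited : List (Int × Bool)) (c : List Int) (i : Int) (out : Int) : Prop := out = dfs_alt graph visited c i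
instance (graph : List (Int × List Int)) (visited : List (Int × Bool)) (c : List Int) (i : Int) (out : Int) : Decidable (Spec_dfs graph visited c i out) := by unfold Spec_dfs; infer_instance

-- ===== CLAIM (what is proved, stated in full; the proofs are below) =====
def Claim_equal_dfs : Prop := ∀ (graph : List (Int × List Int)) (visited : List (Int × Bool)) (c : List Int) (i : Int), Dom_dfs graph visited c i → Pre_dfs graph visited c i → Spec_dfs graph visited c i (dfs graph visited c i)

-- ===== LEMMAS AND PROOFS =====

-- `pushFold arr` is B's tracker state after the child values `arr` collected by A
def pushFold (arr : List Int) : Option (Int × Option Int) := arr.foldl push none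

-- the invariant relating A's list to B's tracker
def Q (arr : List Int) (best : Option (Int × Option Int)) : Prop :=
  match best with
  | none => arr = []
  | some (m1, none) => arr = [m1]
  | some (m1, some m2) => m2 ≤ m1 ∧ ∃ l', arr.Perm (m1 :: m2 :: l') ∧ ∀ y ∈ l', y ≤ m2

theorem Q_push {arr : List Int} {b : Option (Int × Option Int)} (h : Q arr b) (x : Int) :
    Q (arr ++ [x]) (push b x) := by
  match b with
  | none =>
    simp only [Q] at h; subst h
    show Q ([] ++ [x]) (some (x, none))
    simp [Q]
  | some (m1, none) =>
    simp only [Q] at h; subst h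
    by_cases hx : x > m1
    · rw [show push (some (m1, none)) x = some (x, some m1) from by simp [push, hx]]
      exact ⟨le_of_lt hx, [], List.Perm.swap x m1 [], by simp⟩
    · rw [show push (some (m1, none)) x = some (m1, some x) from by simp [push, hx]]
      exact ⟨by omega, [], List.Perm.refl _, by simp⟩
  | some (m1, some m2) =>
    obtain ⟨h12, l', hperm, hl⟩ := h
    have hbase : (arr ++ [x]).Perm (x :: m1 :: m2 :: l') :=
      (hperm.append_right [x]).trans List.perm_append_comm
    by_cases hx1 : x > m1
    · rw [show push (some (m1, some m2)) x = some (x, some m1) from by simp [push, hx1]]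
      refine ⟨le_of_lt hx1, m2 :: l', hbase, ?_⟩
      intro y hy
      rcases List.mem_cons.mp hy with rfl | hy
      · omega
      · exact le_trans (hl y hy) h12
    · by_cases hx2 : x > m2
      · rw [show push (some (m1, some m2)) x = some (m1, some x) from by simp [push, hx1, hx2]]
        refine ⟨by omega, m2 :: l', hbase.trans (List.Perm.swap m1 x (m2 :: l')), ?_⟩
        intro y hy
        rcases List.mem_cons.mp hy with rfl | hy
        · omega
        · exact le_trans (hl y hy) (le_of_lt hx2)
      · rw [show push (some (m1, some m2)) x = some (m1, some m2) from by simp [push, hx1, hx2]]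
        refine ⟨h12, l' ++ [x], ?_, ?_⟩
        · have : (m1 :: m2 :: l') ++ [x] = m1 :: m2 :: (l' ++ [x]) := by simp
          exact this ▸ hperm.append_right [x]
        · intro y hy
          rcases List.mem_append.mp hy with hy | hy
          · exact hl y hy
          · simp at hy; omega

theorem Q_pushFold (arr : List Int) : Q arr (pushFold arr) := by
  induction arr using List.reverseRecOn with
  | nil => simp [Q, pushFold]
  | append_singleton ys x ih =>
    have : pushFold (ys ++ [x]) = push (pushFold ys) x := by simp [pushFold]
    rw [this]; exact Q_push ih x

-- first two entries of A's reverse-sorted list sum to B's tracked top two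
theorem sorted_two {arr : List Int} {m1 m2 : Int} {l' : List Int}
    (hperm : arr.Perm (m1 :: m2 :: l')) (h12 : m2 ≤ m1) (hl : ∀ y ∈ l', y ≤ m2) :
    PySem.List.pyGetD (PySem.List.sorted arr (fun x => x) true) 0 0 +
      PySem.List.pyGetD (PySem.List.sorted arr (fun x => x) true) 1 0 = m1 + m2 := by
  have hsp : (PySem.List.sorted arr (fun x => x) true).Perm (m1 :: m2 :: l') :=
    (PySem.List.sorted_perm arr (fun x => x) true).trans hperm
  have hpw : (PySem.List.sorted arr (fun x => x) true).Pairwise (fun a b => b ≤ a) :=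
    PySem.List.sorted_pairwise_rev arr (fun x => x)
  have hlen : (PySem.List.sorted arr (fun x => x) true).length = l'.length + 2 := by
    simpa using hsp.length_eq
  match hs : PySem.List.sorted arr (fun x => x) true, hlen with
  | a :: b :: t, _ =>
    rw [hs] at hsp hpw
    rw [List.pairwise_cons] at hpw
    obtain ⟨ha, hpw2⟩ := hpw
    rw [List.pairwise_cons] at hpw2
    obtain ⟨hb, _⟩ := hpw2
    have hmax1 : ∀ y ∈ (m1 :: m2 :: l'), y ≤ m1 := by
      intro y hy
      rcases List.mem_cons.mp hy with rfl | hy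
      · exact le_refl _
      · rcases List.mem_cons.mp hy with rfl | hy
        · exact h12
        · exact le_trans (hl y hy) h12
    have ham : a = m1 := by
      have h1 : a ≤ m1 := hmax1 a (hsp.mem_iff.mp (by simp))
      have h2 : m1 ≤ a := by
        rcases List.mem_cons.mp (hsp.mem_iff.mpr (List.mem_cons_self)) with heq | hm
        · omega
        · exact ha _ hm
      omega
    rw [ham] at hsp
    have hsp2 : (b :: t).Perm (m2 :: l') := hsp.cons_inv
    have hbm : b = m2 := by
      have h1 : b ≤ m2 := by
        rcases List.mem_cons.mp (hsp2.mem_iff.mp (List.mem_cons_self)) with heq | hb'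
        · omega
        · exact hl _ hb'
      have h2 : m2 ≤ b := by
        rcases List.mem_cons.mp (hsp2.mem_iff.mpr (List.mem_cons_self)) with heq | hm
        · omega
        · exact hb _ hm
      omega
    have e0 : PySem.List.pyGetD (a :: b :: t) 0 0 = a := PySem.List.pyGetD_zero_cons a (b :: t) 0
    have e1 : PySem.List.pyGetD (a :: b :: t) 1 0 = b := by
      have := PySem.List.pyGetD_eq_getElem (xs := a :: b :: t) (i := 1) (d := 0)
        (by omega) (by simp)
      simpa using this
    rw [e0, e1, ham, hbm]

-- B's m1 is max(arr)
theorem max_eq {arr : List Int} {m1 : Int} (hm : m1 ∈ arr) (hmax : ∀ y ∈ arr, y ≤ m1) :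
    (PySem.List.max? arr (fun x => x)).getD 0 = m1 := by
  have hne : arr ≠ [] := by intro h; simp [h] at hm
  obtain ⟨v, hv⟩ : ∃ v, PySem.List.max? arr (fun x => x) = some v := by
    cases h : PySem.List.max? arr (fun x => x) with
    | none => exact absurd ((PySem.List.max?_eq_none_iff arr _).mp h) hne
    | some v => exact ⟨v, rfl⟩
  have h1 : v ≤ m1 := hmax v (PySem.List.max?_mem hv)
  have h2 : m1 ≤ v := PySem.List.max?_isMax hv m1 hm
  simp [hv]; omega

-- the two function tails agree when B's tracker is the fold of A's list
theorem finish_eq (c : List Int) (i : Int) (arr : List Int) (w : PySem.Dict Int Bool) :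
    finishA c i (arr, w) = finishB c i (pushFold arr, w) := by
  have hq := Q_pushFold arr
  cases h : pushFold arr with
  | none =>
    rw [h] at hq; simp only [Q] at hq; subst hq
    simp [finishA, finishB]
  | some p =>
    obtain ⟨m1, m2⟩ := p
    cases m2 with
    | none =>
      rw [h] at hq; simp only [Q] at hq; subst hq
      have hsr : PySem.List.sorted [m1] (fun x : Int => x) true = [m1] :=
        List.perm_singleton.mp (PySem.List.sorted_perm [m1] (fun x => x) true)
      by_cases hi : i = 1
      · simp [finishA, finishB, hi, hsr, PySem.List.pyGetD_zero_cons]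
      · simp [finishA, finishB, hi, max_eq (List.mem_singleton_self m1) (by simp)]
    | some m2v =>
      rw [h] at hq
      obtain ⟨h12, l', hperm, hl⟩ := hq
      have hlen : arr.length = l'.length + 2 := by simpa using hperm.length_eq
      have hm1 : m1 ∈ arr := hperm.mem_iff.mpr List.mem_cons_self
      have hmax : ∀ y ∈ arr, y ≤ m1 := by
        intro y hy
        rcases List.mem_cons.mp (hperm.mem_iff.mp hy) with rfl | hy'
        · exact le_refl _
        · rcases List.mem_cons.mp hy' with rfl | hy''
          · exact h12
          · exact le_trans (hl y hy'') h12
      by_cases hi : i = 1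
      · have hst := sorted_two hperm h12 hl
        have hgt : arr.length > 1 := by omega
        simp [finishA, finishB, hi, hgt, hst]
        rintro rfl
        simp at hlen
      · simp [finishA, finishB, hi, hlen, max_eq hm1 hmax]

-- the two child loops agree: B's state is (fold of A's list, A's visited dict)
theorem fold_eq (graph : PySem.Dict Int (List Int)) (c : List Int) (fuel : Nat)
    (IH : ∀ (v : PySem.Dict Int Bool) (j : Int), dfsA graph c fuel v j = dfsB graph c fuel v j) :
    ∀ (ns : List Int) (arr : List Int) (w : PySem.Dict Int Bool),
      ns.foldl (fun (st : Option (Int × Option Int) × PySem.Dict Int Bool) j =>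
          if (st.2.get? j).getD true = false then
            let r := dfsB graph c fuel st.2 j
            (push st.1 r.1, r.2)
          else st) (pushFold arr, w)
      = (pushFold ((ns.foldl (fun (st : List Int × PySem.Dict Int Bool) j =>
            if (st.2.get? j).getD true = false then
              let r := dfsA graph c fuel st.2 j
              (st.1 ++ [r.1], r.2)
            else st) (arr, w)).1),
         (ns.foldl (fun (st : List Int × PySem.Dict Int Bool) j =>
            if (st.2.get? j).getD true = false then
              let r := dfsA graph c fuel st.2 j
              (st.1 ++ [r.1], r.2)
            else st) (arr, w)).2) := by
  intro ns
  induction ns with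
  | nil => intro arr w; rfl
  | cons j ns ih =>
    intro arr w
    simp only [List.foldl_cons]
    by_cases hj : (w.get? j).getD true = false
    · rw [if_pos hj, if_pos hj, ← IH w j]
      have hp : push (pushFold arr) (dfsA graph c fuel w j).1
          = pushFold (arr ++ [(dfsA graph c fuel w j).1]) := by
        simp [pushFold]
      rw [hp]
      exact ih _ _
    · rw [if_neg hj, if_neg hj]
      exact ih arr w

-- the two ports agree (value and final visited dict), for any fuel
theorem dfsAB (graph : PySem.Dict Int (List Int)) (c : List Int) :
    ∀ (fuel : Nat) (v : PySem.Dict Int Bool) (i : Int),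
      dfsA graph c fuel v i = dfsB graph c fuel v i := by
  intro fuel
  induction fuel with
  | zero => intro v i; rfl
  | succ fuel ih =>
    intro v i
    rw [dfsA, dfsB]
    cases graph.get? i with
    | none =>
      simp only [Option.getD_none, List.foldl_nil]
      exact finish_eq c i [] (v.insert i true)
    | some ns =>
      simp only [Option.getD_some]
      have h0 : (none : Option (Int × Option Int)) = pushFold [] := rfl
      rw [h0, fold_eq graph c fuel ih ns [] (v.insert i true)]
      exact finish_eq c i _ _

-- ===== VERDICT (by name: the statement is the Claim_ definition above) =====
theorem dfs_spec : Claim_equal_dfs := by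
  intro graph visited c i _ _
  unfold Spec_dfs dfs dfs_alt
  rw [dfsAB]
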